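-- pv_equiv track=rewrite | github.com/Bhumesh2001/Web_Scraping_With_Py | webscraping task.11.py | analyse_movies_genre
-- ===== SOURCE A (Python) =====
-- def analyse_movies_genre(movies):
--     mo_genre={}
--     for i in movies:
--         for y in i['genre']:
--             if y in mo_genre:
--                 mo_genre[y]+=1
--             else:
--                 mo_genre[y]=1
--     return (mo_genre)
-- ===== SOURCE B (Python) =====
-- def analyse_movies_genre(movies):
--     flat = [g for m in movies for g in m['genre']]
--     return {g: flat.count(g) for g in dict.fromkeys(flat)}
-- ===== Notes on version B (the rewrite author's own statement) =====
-- stated objective: alternative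
-- what changed: Replaces the nested hash-accumulation loops (check membership, increment or initialise) with a flatten-dedup-count pipeline: build the flat genre list, take its first-occurrence distinct keys via dict.fromkeys, and map each key to flat.count(key).
import Mathlib
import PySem

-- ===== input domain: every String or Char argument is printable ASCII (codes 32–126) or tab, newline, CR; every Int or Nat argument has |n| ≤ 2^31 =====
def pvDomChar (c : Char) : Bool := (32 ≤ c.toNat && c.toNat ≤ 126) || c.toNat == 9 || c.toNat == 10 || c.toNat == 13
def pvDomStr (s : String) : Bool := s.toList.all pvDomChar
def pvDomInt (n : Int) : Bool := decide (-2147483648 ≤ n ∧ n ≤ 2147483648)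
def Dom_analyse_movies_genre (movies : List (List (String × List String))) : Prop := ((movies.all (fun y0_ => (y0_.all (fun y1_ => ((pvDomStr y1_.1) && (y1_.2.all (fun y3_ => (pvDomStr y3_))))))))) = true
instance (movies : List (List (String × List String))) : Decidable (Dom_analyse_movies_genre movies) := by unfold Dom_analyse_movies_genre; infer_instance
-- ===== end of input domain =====

-- B replaces A's nested membership-check/increment accumulation with a flatten, first-occurrence
-- dedup (dict.fromkeys) and a per-key count; same result dict, no speed claim.

-- ===== PORT A =====
-- A: nested loops accumulating counts in a dict, 'if y in d: d[y]+=1 else: d[y]=1'.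
def analyse_movies_genre (movies : List (List (String × List String))) : List (String × Int) :=
  (movies.foldl (fun d i =>
      ((PySem.Dict.get? (PySem.Dict.mk i) "genre").getD []).foldl (fun d y =>
        match PySem.Dict.get? d y with
        | some v => PySem.Dict.insert d y (v + 1)
        | none => PySem.Dict.insert d y (1 : Int)) d)
    (PySem.Dict.empty : PySem.Dict String Int)).items

-- ===== PORT B =====
-- B: flat = all genres in order; result = {g: flat.count(g) for g in dict.fromkeys(flat)}.
def analyse_movies_genre_alt (movies : List (List (String × List String))) : List (String × Int) :=
  let flat := movies.flatMap (fun m => (PySem.Dict.get? (PySem.Dict.mk m) "genre").getD [])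
  (PySem.List.dedup flat).map (fun g => (g, (flat.count g : Int)))

-- ===== PRECONDITION & SPEC =====
-- Pre_ excludes movies lacking a 'genre' key, on which both Pythons raise KeyError.
def Pre_analyse_movies_genre (movies : List (List (String × List String))) : Prop :=
  ∀ m ∈ movies, (PySem.Dict.mk m).contains "genre" = true
instance (movies : List (List (String × List String))) : Decidable (Pre_analyse_movies_genre movies) := by unfold Pre_analyse_movies_genre; infer_instance
def pvWitness_analyse_movies_genre : (List (List (String × List String))) :=
  ([[("genre", ["drama", "action"])], [("genre", ["drama"])]])
def Spec_analyse_movies_genre (movies : List (List (String × List String))) (out : List (String × Int)) : Prop := out = analyse_movies_genre_alt movies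
instance (movies : List (List (String × List String))) (out : List (String × Int)) : Decidable (Spec_analyse_movies_genre movies out) := by unfold Spec_analyse_movies_genre; infer_instance

-- ===== CLAIM (what is proved, stated in full; the proofs are below) =====
def Claim_equal_analyse_movies_genre : Prop := ∀ (movies : List (List (String × List String))), Dom_analyse_movies_genre movies → Pre_analyse_movies_genre movies → Spec_analyse_movies_genre movies (analyse_movies_genre movies)

-- ===== LEMMAS AND PROOFS =====

-- A's inner step is the 'insert (getD + 1)' counting step.
theorem pv_step_eq (d : PySem.Dict String Int) (y : String) :
    (match PySem.Dict.get? d y with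
     | some v => PySem.Dict.insert d y (v + 1)
     | none => PySem.Dict.insert d y 1) =
    PySem.Dict.insert d y (PySem.Dict.getD d y 0 + 1) := by
  cases h : PySem.Dict.get? d y <;> simp [PySem.Dict.getD, h]

-- the nested fold over movies is the counting fold over the flattened genre list
theorem pv_fold_flat (movies : List (List (String × List String)))
    (d : PySem.Dict String Int) :
    movies.foldl (fun d i =>
      ((PySem.Dict.get? (PySem.Dict.mk i) "genre").getD []).foldl
        (fun d y => PySem.Dict.insert d y (PySem.Dict.getD d y 0 + 1)) d) d =
    (movies.flatMap (fun m => (PySem.Dict.get? (PySem.Dict.mk m) "genre").getD [])).foldl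
      (fun d y => PySem.Dict.insert d y (PySem.Dict.getD d y 0 + 1)) d := by
  induction movies generalizing d with
  | nil => rfl
  | cons m t ih => simp [List.flatMap_cons, List.foldl_append, ih]

-- ===== VERDICT (by name: the statement is the Claim_ definition above) =====
theorem analyse_movies_genre_spec : Claim_equal_analyse_movies_genre := by
  intro movies _ _
  show _ = _
  unfold analyse_movies_genre analyse_movies_genre_alt
  simp only [pv_step_eq, pv_fold_flat,
    PySem.Dict.foldl_insert_getD_add_one_eq_counter, PySem.Dict.items_counter,
    PySem.List.dedup_eq_ofList]
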